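-- pv_equiv track=rewrite | github.com/Sarnavskiy-Alexey/MAI_Python | 4_kyu/Counting_String_Subsequences.py | rec_foo
-- ===== SOURCE A (Python) =====
-- def rec_foo(l, idx=-1):
--     s = 0
--     if len(l) > 1:
--         for i in range(len(l[0])):
--             if idx < l[0][i]:
--                 s += rec_foo(l[1:], l[0][i])
--         return s
--     else:
--         for x in l[0]:
--             if idx < x:
--                 s += 1
--         return s
-- ===== SOURCE B (Python) =====
-- def rec_foo(l, idx=-1):
--     # bottom-up DP over the lists from last to first; each level keeps
--     # (value, count) pairs sorted by value descending, so every level is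
--     # combined with the next by one merge sweep with a running sum.
--     cur = [(x, 1) for x in sorted(l[-1], reverse=True)]
--     for xs in reversed(l[:-1]):
--         new = []
--         s = 0
--         j = 0
--         for x in sorted(xs, reverse=True):
--             while j < len(cur) and x < cur[j][0]:
--                 s += cur[j][1]
--                 j += 1
--             new.append((x, s))
--         cur = new
--     s = 0
--     j = 0
--     while j < len(cur) and idx < cur[j][0]:
--         s += cur[j][1]
--         j += 1
--     return s
-- ===== Notes on version B (the rewrite author's own statement) =====
-- stated objective: alternative
-- what changed: Replaces A's naive top-down recursion over every combination with a bottom-up dynamic program that keeps each level's (value, count) pairs sorted descending and combines adjacent levels by a single running-sum merge sweep.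
import Mathlib
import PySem

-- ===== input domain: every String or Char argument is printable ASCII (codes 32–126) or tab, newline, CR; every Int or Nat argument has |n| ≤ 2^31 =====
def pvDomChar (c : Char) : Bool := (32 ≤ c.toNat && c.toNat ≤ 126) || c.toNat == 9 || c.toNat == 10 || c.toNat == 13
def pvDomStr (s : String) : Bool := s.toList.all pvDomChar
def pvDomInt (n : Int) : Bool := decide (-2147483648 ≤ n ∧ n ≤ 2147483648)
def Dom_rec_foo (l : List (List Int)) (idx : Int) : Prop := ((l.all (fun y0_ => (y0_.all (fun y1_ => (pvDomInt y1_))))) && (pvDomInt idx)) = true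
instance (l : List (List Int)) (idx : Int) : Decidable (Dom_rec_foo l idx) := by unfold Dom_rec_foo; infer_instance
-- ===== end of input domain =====

-- B replaces A's naive recursion over every combination by a bottom-up DP over
-- descending-sorted (value, count) pairs combined by a running-sum merge sweep
-- (objective: alternative algorithm).

-- ===== PORT A =====
-- A raises IndexError on l = [] (it evaluates l[0]); Pre_ excludes exactly that input.
def rec_foo (l : List (List Int)) (idx : Int) : Int :=
  match l with
  | [] => 0  -- unreachable under Pre_rec_foo (Python raises IndexError here)
  | [xs] => xs.foldl (fun s x => if idx < x then s + 1 else s) 0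
  | xs :: rest => xs.foldl (fun s x => if idx < x then s + rec_foo rest x else s) 0

-- ===== PORT B =====
-- the 'while j < len(cur) and t < cur[j][0]: s += cur[j][1]; j += 1' loop of B;
-- the index walk j over the immutable list cur is ported as recursion on cur's suffix
def bSweep (t : Int) (s : Int) : List (Int × Int) → Int × List (Int × Int)
  | [] => (s, [])
  | p :: rest => if t < p.1 then bSweep t (s + p.2) rest else (s, p :: rest)

-- body of B's 'for x in sorted(xs, reverse=True)' loop: state (new, s, remaining cur)
def bStep (acc : List (Int × Int) × Int × List (Int × Int)) (x : Int) :
    List (Int × Int) × Int × List (Int × Int) :=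
  let r := bSweep x acc.2.1 acc.2.2
  (acc.1 ++ [(x, r.1)], r.1, r.2)

def bRow (xs : List Int) (cur : List (Int × Int)) : List (Int × Int) :=
  (xs.foldl bStep ([], 0, cur)).1

-- cur after B's 'for xs in reversed(l[:-1])' loop (the reversed loop = structural foldr)
def bState : List (List Int) → List (Int × Int)
  | [] => []
  | xs :: rest =>
      match rest with
      | [] => (PySem.List.sorted xs (fun v => v) true).map (fun x => (x, 1))
      | _ :: _ => bRow (PySem.List.sorted xs (fun v => v) true) (bState rest)

def rec_foo_alt (l : List (List Int)) (idx : Int) : Int :=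
  (bSweep idx 0 (bState l)).1

-- ===== PRECONDITION & SPEC =====
-- A (and B) raise IndexError on the empty outer list; nothing else raises.
def Pre_rec_foo (l : List (List Int)) (idx : Int) : Prop := l ≠ []
instance (l : List (List Int)) (idx : Int) : Decidable (Pre_rec_foo l idx) := by unfold Pre_rec_foo; infer_instance
def pvWitness_rec_foo : List (List Int) × Int := ([[1, 2], [3]], 0)

def Spec_rec_foo (l : List (List Int)) (idx : Int) (out : Int) : Prop := out = rec_foo_alt l idx
instance (l : List (List Int)) (idx : Int) (out : Int) : Decidable (Spec_rec_foo l idx out) := by unfold Spec_rec_foo; infer_instance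

-- ===== CLAIM (what is proved, stated in full; the proofs are below) =====
def Claim_equal_rec_foo : Prop := ∀ (l : List (List Int)) (idx : Int), Dom_rec_foo l idx → Pre_rec_foo l idx → Spec_rec_foo l idx (rec_foo l idx)

-- ===== LEMMAS AND PROOFS =====

-- sum of the counts of the pairs whose value exceeds t
def sGT (t : Int) (ps : List (Int × Int)) : Int :=
  ((ps.filter (fun p => decide (t < p.1))).map (fun p => p.2)).sum

theorem sGT_cons (t : Int) (p : Int × Int) (ps : List (Int × Int)) :
    sGT t (p :: ps) = if t < p.1 then p.2 + sGT t ps else sGT t ps := by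
  by_cases h : t < p.1 <;> simp [sGT, h]

theorem filter_notlt_eq (x : Int) (ps : List (Int × Int)) :
    ps.filter (fun p => ! decide (x < p.1)) = ps.filter (fun p => decide (p.1 ≤ x)) := by
  apply List.filter_congr
  intro p _
  by_cases h : x < p.1
  · simp [h, show ¬ p.1 ≤ x by omega]
  · simp [h, show p.1 ≤ x by omega]

-- on a value-descending pair list the sweep accumulates exactly the counts above t
theorem bSweep_fst (t : Int) :
    ∀ (ps : List (Int × Int)) (s : Int),
      ps.Pairwise (fun a b => b.1 ≤ a.1) → (bSweep t s ps).1 = s + sGT t ps := by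
  intro ps
  induction ps with
  | nil => intro s _; simp [bSweep, sGT]
  | cons p rest ih =>
      intro s hp
      rw [List.pairwise_cons] at hp
      by_cases h : t < p.1
      · simp only [bSweep]
        rw [if_pos h, sGT_cons, if_pos h, ih (s + p.2) hp.2]
        ring
      · have hz : sGT t (p :: rest) = 0 := by
          rw [sGT_cons, if_neg h]
          have : rest.filter (fun p => decide (t < p.1)) = [] := by
            apply List.filter_eq_nil_iff.mpr
            intro q hq
            have := hp.1 q hq
            simp only [decide_eq_true_eq]
            omega
          simp [sGT, this]
        simp only [bSweep]
        rw [if_neg h, hz]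
        simp

theorem bSweep_snd (t : Int) :
    ∀ (ps : List (Int × Int)) (s : Int),
      ps.Pairwise (fun a b => b.1 ≤ a.1) →
      (bSweep t s ps).2 = ps.filter (fun p => decide (p.1 ≤ t)) := by
  intro ps
  induction ps with
  | nil => intro s _; simp [bSweep]
  | cons p rest ih =>
      intro s hp
      rw [List.pairwise_cons] at hp
      by_cases h : t < p.1
      · have heq : (p :: rest).filter (fun p => decide (p.1 ≤ t)) = rest.filter (fun p => decide (p.1 ≤ t)) := by
          simp [show ¬ p.1 ≤ t by omega]
        rw [heq]
        simp only [bSweep]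
        rw [if_pos h]
        exact ih (s + p.2) hp.2
      · have hall : rest.filter (fun p => decide (p.1 ≤ t)) = rest := by
          apply List.filter_eq_self.mpr
          intro q hq
          have := hp.1 q hq
          simp only [decide_eq_true_eq]
          omega
        simp only [bSweep]
        rw [if_neg h]
        simp [show p.1 ≤ t by omega, hall]

-- partition of the count sum by an arbitrary boolean predicate
theorem sum_snd_partition (Q : Int × Int → Bool) :
    ∀ ps : List (Int × Int),
      ((ps.filter Q).map (fun p => p.2)).sum + ((ps.filter (fun p => ! Q p)).map (fun p => p.2)).sum
        = (ps.map (fun p => p.2)).sum := by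
  intro ps
  induction ps with
  | nil => simp
  | cons p rest ih =>
      cases h : Q p
      · simp only [List.filter_cons, h]
        simp
        omega
      · simp only [List.filter_cons, h]
        simp
        omega

-- loop invariant of B's row computation: the unconsumed suffix is a filter of cur,
-- s the sum of the consumed counts; each emitted count is the full above-x sum over cur
theorem bRow_inv :
    ∀ (xs : List Int) (cur : List (Int × Int)) (P : Int × Int → Bool) (s : Int) (out : List (Int × Int)),
      cur.Pairwise (fun a b => b.1 ≤ a.1) →
      xs.Pairwise (fun a b => b ≤ a) →
      (∀ x ∈ xs, ∀ p : Int × Int, p.1 ≤ x → P p = true) →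
      s = (cur.map (fun p => p.2)).sum - (((cur.filter P).map (fun p => p.2)).sum) →
      (xs.foldl bStep (out, s, cur.filter P)).1 = out ++ xs.map (fun x => (x, sGT x cur)) := by
  intro xs
  induction xs with
  | nil => intro cur P s out _ _ _ _; simp
  | cons x xs ih =>
      intro cur P s out hcur hxs hP hs
      rw [List.pairwise_cons] at hxs
      have hfilt : (cur.filter P).Pairwise (fun a b => b.1 ≤ a.1) := List.Pairwise.filter _ hcur
      have hle : (cur.filter P).filter (fun p => decide (p.1 ≤ x)) = cur.filter (fun p => decide (p.1 ≤ x)) := by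
        rw [List.filter_filter]
        apply List.filter_congr
        intro p _
        cases hq : decide (p.1 ≤ x)
        · simp
        · simp only [decide_eq_true_eq] at hq
          simp [hP x (by simp) p hq]
      have hfst : (bSweep x s (cur.filter P)).1 = sGT x cur := by
        rw [bSweep_fst x _ s hfilt, hs]
        have hA := sum_snd_partition (fun p => decide (x < p.1)) (cur.filter P)
        have hB := sum_snd_partition (fun p => decide (x < p.1)) cur
        rw [filter_notlt_eq, hle] at hA
        rw [filter_notlt_eq] at hB
        unfold sGT at *
        omega
      have hsnd : (bSweep x s (cur.filter P)).2 = cur.filter (fun p => decide (p.1 ≤ x)) := by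
        rw [bSweep_snd x _ s hfilt, hle]
      simp only [List.foldl_cons]
      have hstep : bStep (out, s, cur.filter P) x
          = (out ++ [(x, sGT x cur)], sGT x cur, cur.filter (fun p => decide (p.1 ≤ x))) := by
        simp [bStep, hfst, hsnd]
      rw [hstep]
      have hnext := ih cur (fun p => decide (p.1 ≤ x)) (sGT x cur) (out ++ [(x, sGT x cur)]) hcur hxs.2
        (by
          intro y hy p hp
          have := hxs.1 y hy
          simp only [decide_eq_true_eq]
          omega)
        (by
          have hB := sum_snd_partition (fun p => decide (x < p.1)) cur
          rw [filter_notlt_eq] at hB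
          unfold sGT
          omega)
      rw [hnext]
      simp

theorem bRow_spec (xs : List Int) (cur : List (Int × Int))
    (hcur : cur.Pairwise (fun a b => b.1 ≤ a.1)) (hxs : xs.Pairwise (fun a b => b ≤ a)) :
    bRow xs cur = xs.map (fun x => (x, sGT x cur)) := by
  have h := bRow_inv xs cur (fun _ => true) 0 [] hcur hxs (by intro x _ p _; rfl) (by simp)
  unfold bRow
  simpa using h

theorem bState_cons_cons (xs ys : List Int) (rest' : List (List Int)) :
    bState (xs :: ys :: rest') = bRow (PySem.List.sorted xs (fun v => v) true) (bState (ys :: rest')) := rfl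

-- the state list is always descending in its value component
theorem bState_desc : ∀ l : List (List Int), (bState l).Pairwise (fun a b => b.1 ≤ a.1) := by
  intro l
  induction l with
  | nil => simp [bState]
  | cons xs rest ih =>
      have hsorted : (PySem.List.sorted xs (fun v => v) true).Pairwise (fun a b : Int => b ≤ a) :=
        PySem.List.sorted_pairwise_rev xs (fun v => v)
      cases rest with
      | nil =>
          simp only [bState]
          rw [List.pairwise_map]
          exact hsorted
      | cons ys rest' =>
          rw [bState_cons_cons, bRow_spec _ _ ih hsorted, List.pairwise_map]
          exact hsorted

-- sums of counts over a filtered mapped list are invariant under permutation of the base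
theorem sGT_perm (t : Int) (f : Int → Int × Int) {ys xs : List Int} (h : ys.Perm xs) :
    sGT t (ys.map f) = sGT t (xs.map f) := by
  unfold sGT
  exact List.Perm.sum_eq (List.Perm.map _ (List.Perm.filter _ (List.Perm.map f h)))

-- the guarded counting fold of A equals the filtered count sum over the paired list
theorem foldl_guard_eq_sum (g : Int → Int) (idx : Int) :
    ∀ (xs : List Int) (a : Int),
      xs.foldl (fun s x => if idx < x then s + g x else s) a
        = a + sGT idx (xs.map (fun x => (x, g x))) := by
  intro xs
  induction xs with
  | nil => intro a; simp [sGT]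
  | cons x xs ih =>
      intro a
      simp only [List.foldl_cons, List.map_cons, sGT_cons]
      by_cases h : idx < x
      · simp only [if_pos h, ih]
        ring
      · simp [if_neg h, ih]

-- main bridge: the filtered count sum over B's state is exactly A's recursion
theorem bState_sum : ∀ (l : List (List Int)), l ≠ [] → ∀ t : Int, sGT t (bState l) = rec_foo l t := by
  intro l
  induction l with
  | nil => intro h; exact absurd rfl h
  | cons xs rest ih =>
      intro _ t
      have hperm : (PySem.List.sorted xs (fun v => v) true).Perm xs :=
        PySem.List.sorted_perm xs (fun v => v) true
      cases rest with
      | nil =>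
          simp only [bState, rec_foo]
          rw [sGT_perm t _ hperm]
          have h := foldl_guard_eq_sum (fun _ => 1) t xs 0
          simp only [zero_add] at h
          exact h.symm
      | cons ys rest' =>
          have hdesc := bState_desc (ys :: rest')
          have hsorted : (PySem.List.sorted xs (fun v => v) true).Pairwise (fun a b : Int => b ≤ a) :=
            PySem.List.sorted_pairwise_rev xs (fun v => v)
          simp only [rec_foo]
          rw [bState_cons_cons, bRow_spec _ _ hdesc hsorted]
          have hmapeq : (PySem.List.sorted xs (fun v => v) true).map (fun x => (x, sGT x (bState (ys :: rest'))))
              = (PySem.List.sorted xs (fun v => v) true).map (fun x => (x, rec_foo (ys :: rest') x)) :=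
            List.map_congr_left (fun x _ => by rw [ih (by simp) x])
          rw [hmapeq, sGT_perm t _ hperm]
          have h := foldl_guard_eq_sum (fun x => rec_foo (ys :: rest') x) t xs 0
          simp only [zero_add] at h
          exact h.symm

-- ===== VERDICT (by name: the statement is the Claim_ definition above) =====
theorem rec_foo_spec : Claim_equal_rec_foo := by
  intro l idx _ hpre
  unfold Spec_rec_foo rec_foo_alt
  rw [bSweep_fst idx (bState l) 0 (bState_desc l), bState_sum l hpre idx]
  omega
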